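-- pv_equiv track=rewrite | github.com/kmavyrle/Equity-Pairs-Trading | quant_lib.py | final_return_before_trade
-- ===== SOURCE A (Python) =====
-- def final_return_before_trade(positions_list:list)->int:
--     # Returns the first index from the back in a reversed list
--     start = -1
--     counter  =-2
--     for i in positions_list[-2::-1]:
--         if i != 0:
--             counter-=1
--         if i ==0:
--             break
--     return counter
-- ===== SOURCE B (Python) =====
-- def final_return_before_trade(positions_list: list) -> int:
--     # Forward pass over the head (all but the last element), keeping the
--     # length of the current run of nonzeros; a zero resets it.  After the
--     # loop the counter is the trailing nonzero-run length of the head.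
--     run = 0
--     for x in positions_list[:-1]:
--         run = 0 if x == 0 else run + 1
--     return -2 - run
-- ===== Notes on version B (the rewrite author's own statement) =====
-- stated objective: alternative
-- what changed: Replaces A's reversed-slice scan with early break by a single forward pass over positions_list[:-1] maintaining a run counter that resets to 0 on zeros; the final counter is the trailing nonzero-run length and the result is -2 - counter.
import Mathlib
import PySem

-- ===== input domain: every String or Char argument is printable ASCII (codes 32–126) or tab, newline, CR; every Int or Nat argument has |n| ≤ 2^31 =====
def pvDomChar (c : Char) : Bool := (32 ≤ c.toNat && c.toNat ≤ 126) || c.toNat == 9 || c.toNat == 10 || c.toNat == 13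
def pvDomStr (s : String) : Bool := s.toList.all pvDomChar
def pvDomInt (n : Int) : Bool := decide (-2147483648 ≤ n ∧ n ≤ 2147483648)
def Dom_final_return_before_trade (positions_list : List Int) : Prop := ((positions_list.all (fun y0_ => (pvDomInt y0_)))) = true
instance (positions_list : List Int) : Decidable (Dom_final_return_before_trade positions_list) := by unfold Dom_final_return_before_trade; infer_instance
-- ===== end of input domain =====

-- B replaces A's reversed-slice scan with early break by a forward pass over
-- positions_list[:-1] keeping a nonzero-run counter that resets on zeros (alternative decomposition).

-- ===== PORT A =====
-- the 'for i in …: if i != 0: counter -= 1; if i == 0: break' loop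
def pvALoop : List Int → Int → Int
  | [], c => c
  | i :: rest, c =>
    let c' := if i ≠ 0 then c - 1 else c
    if i == 0 then c' else pvALoop rest c'

def final_return_before_trade (positions_list : List Int) : Int :=
  -- start = -1 is assigned and never used in A
  pvALoop ((PySem.List.slice? positions_list (some (-2)) none (-1)).getD []) (-2)

-- ===== PORT B =====
def final_return_before_trade_alt (positions_list : List Int) : Int :=
  -2 - (PySem.List.slice positions_list none (some (-1))).foldl
        (fun run x => if x = 0 then 0 else run + 1) 0

-- ===== PRECONDITION & SPEC =====
def Spec_final_return_before_trade (positions_list : List Int) (out : Int) : Prop := out = final_return_before_trade_alt positions_list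
instance (positions_list : List Int) (out : Int) : Decidable (Spec_final_return_before_trade positions_list out) := by unfold Spec_final_return_before_trade; infer_instance

-- ===== CLAIM (what is proved, stated in full; the proofs are below) =====
def Claim_equal_final_return_before_trade : Prop := ∀ (positions_list : List Int), Dom_final_return_before_trade positions_list → Spec_final_return_before_trade positions_list (final_return_before_trade positions_list)

-- ===== LEMMAS AND PROOFS =====

-- sliceIndices for start=-2, stop omitted, step=-1
theorem pv_hsi (n : Nat) : PySem.List.sliceIndices n (some (-2)) none (-1)
    = (max ((n : Int) - 2) (-1), -1, -1) := by
  simp only [PySem.List.sliceIndices]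
  norm_num
  omega

-- descending valid-index reads collect the reversed prefix
theorem pv_fm (xs : List Int) : ∀ m : Nat, m < xs.length →
    List.filterMap (fun k : Nat => xs[(((m:Int)) - (k:Int)).toNat]?) (List.range (m+1))
      = (xs.take (m+1)).reverse := by
  intro m
  induction m with
  | zero =>
    intro h
    simp [List.range_succ, List.take_add_one, List.getElem?_eq_getElem h]
  | succ m ih =>
    intro h
    have hm : m < xs.length := by omega
    rw [List.range_succ_eq_map, List.filterMap_cons, List.filterMap_map]
    have hf : ((fun k : Nat => xs[(((m+1:Nat):Int) - (k:Int)).toNat]?) ∘ Nat.succ)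
        = (fun k : Nat => xs[(((m:Int)) - (k:Int)).toNat]?) := by
      funext k
      simp only [Function.comp]
      congr 1
      push_cast
      omega
    rw [hf, ih hm]
    simp [List.getElem?_eq_getElem h, List.take_add_one]

-- the Python slice xs[-2::-1] is the reverse of xs without its last element
theorem pv_slice_neg2_rev (xs : List Int) :
    PySem.List.slice? xs (some (-2)) none (-1) = some xs.dropLast.reverse := by
  unfold PySem.List.slice?
  rw [pv_hsi]
  norm_num
  by_cases h1 : xs.length ≤ 1
  · have hs : max ((xs.length : Int) - 2) (-1) = -1 := by omega
    rw [hs, if_neg (show ¬ 1 < xs.length by omega)]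
    have hd : xs.dropLast = [] := by
      cases xs with
      | nil => rfl
      | cons a t => cases t with
        | nil => rfl
        | cons b u => simp at h1
    simp [hd]
  · have hs : max ((xs.length : Int) - 2) (-1) = (xs.length : Int) - 2 := by omega
    rw [hs, if_pos (show 1 < xs.length by omega)]
    have hco : ((xs.length:Int) - 2 + 1).toNat = (xs.length - 2) + 1 := by omega
    rw [hco]
    have hfun : (fun x : Nat => xs[((xs.length:Int) - 2 + -(x:Int)).toNat]?)
        = (fun k : Nat => xs[(((xs.length - 2 : Nat):Int) - (k:Int)).toNat]?) := by
      funext k; congr 1; omega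
    rw [hfun, pv_fm xs (xs.length - 2) (by omega)]
    rw [List.dropLast_eq_take]
    congr 2
    omega

-- A's loop subtracts the length of the leading nonzero run of its input
theorem pvALoop_eq (r : List Int) (c : Int) :
    pvALoop r c = c - ((r.takeWhile (fun i => i != 0)).length : Int) := by
  induction r generalizing c with
  | nil => simp [pvALoop]
  | cons i rest ih =>
    rcases eq_or_ne i 0 with h | h
    · subst h
      simp [pvALoop]
    · have hb : (i != 0) = true := by simpa using h
      have hcons : List.takeWhile (fun j => j != 0) (i :: rest)
          = i :: List.takeWhile (fun j => j != 0) rest := List.takeWhile_cons_of_pos hb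
      have hstep : pvALoop (i :: rest) c = pvALoop rest (c - 1) := by
        simp [pvALoop, h]
      rw [hstep, hcons, ih]
      simp only [List.length_cons]
      push_cast
      ring

-- B's reset-fold computes the length of the trailing nonzero run
theorem pvFold_eq (l : List Int) :
    l.foldl (fun run x => if x = 0 then 0 else run + 1) 0
      = ((l.reverse.takeWhile (fun i => i != 0)).length : Int) := by
  induction l using List.reverseRecOn with
  | nil => simp
  | append_singleton l x ih =>
    by_cases h : x = 0
    · subst h; simp
    · simp [List.foldl_append, h, ih]

-- ===== VERDICT (by name: the statement is the Claim_ definition above) =====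
theorem final_return_before_trade_spec : Claim_equal_final_return_before_trade := by
  intro xs _
  unfold Spec_final_return_before_trade final_return_before_trade final_return_before_trade_alt
  rw [pv_slice_neg2_rev, PySem.List.slice_to_neg_one, pvFold_eq]
  simp [pvALoop_eq]
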